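-- pv_equiv track=rewrite | github.com/jsw6872/TIL | coding_test/programmers/코딩테스트_입문/최빈값_구하기/my_solution.py | solution
-- ===== SOURCE A (Python) =====
-- from collections import Counter
--
-- def solution(array):
--     count_dict = Counter(array)
--
--     max_num = max(count_dict.values())
--
--     count = 0
--     r_key = None
--
--     for key in count_dict:
--         if count_dict[key] == max_num:
--             count += 1
--             r_key = key
--     if count == 1:
--         return r_key
--     else:
--         return -1
-- ===== SOURCE B (Python) =====
-- from collections import Counter
--
-- def solution(array):
--     best_key = None
--     best_count = 0
--     tie = False
--     for key, c in Counter(array).items():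
--         if c > best_count:
--             best_key, best_count, tie = key, c, False
--         elif c == best_count:
--             tie = True
--     if tie:
--         return -1
--     return best_key
-- ===== Notes on version B (the rewrite author's own statement) =====
-- stated objective: alternative
-- what changed: A computes max(counts) and then rescans the counter with per-key lookups counting how many keys attain it; B makes a single pass over the counter items maintaining (best_key, best_count, tie) with no separate max pass and no lookups.
-- outside the precondition, e.g. on solution([]): A raises ValueError, B returns None
import Mathlib
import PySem

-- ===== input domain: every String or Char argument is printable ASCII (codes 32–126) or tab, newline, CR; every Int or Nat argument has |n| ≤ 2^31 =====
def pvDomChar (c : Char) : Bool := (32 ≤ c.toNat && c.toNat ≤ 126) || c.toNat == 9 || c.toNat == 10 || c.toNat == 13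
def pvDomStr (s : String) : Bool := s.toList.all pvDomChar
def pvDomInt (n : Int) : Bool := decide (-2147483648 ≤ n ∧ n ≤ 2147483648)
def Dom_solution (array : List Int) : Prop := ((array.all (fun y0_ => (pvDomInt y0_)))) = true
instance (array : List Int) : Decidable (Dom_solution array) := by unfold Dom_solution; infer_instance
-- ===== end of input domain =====

-- B replaces A's max-then-rescan over the counter by a single pass over the counter items
-- maintaining (best_key, best_count, tie); same cost class, different decomposition.

-- ===== PORT A =====
def solution (array : List Int) : Int :=
  let countDict := PySem.Dict.counter array
  -- max(count_dict.values()); none = ValueError on empty input, excluded by Pre_solution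
  match PySem.List.max? countDict.values (fun v => v) with
  | none => 0
  | some maxNum =>
    -- for key in count_dict: if count_dict[key] == max_num: count += 1; r_key = key
    -- (count_dict[key] cannot raise KeyError since key ∈ keys; ported as getD)
    let st := countDict.keys.foldl
      (fun (s : Int × Option Int) key =>
        if countDict.getD key 0 == maxNum then (s.1 + 1, some key) else s)
      (0, none)
    if st.1 == 1 then st.2.getD (-1) else -1

-- ===== PORT B =====
def solution_alt (array : List Int) : Int :=
  -- one pass over Counter(array).items() with state (best_key, best_count, tie)
  let st := (PySem.Dict.counter array).items.foldl
    (fun (s : Option Int × Int × Bool) kv =>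
      if kv.2 > s.2.1 then (some kv.1, kv.2, false)
      else if kv.2 == s.2.1 then (s.1, s.2.1, true)
      else s)
    (none, 0, false)
  if st.2.2 then -1 else st.1.getD 0  -- best_key is None only on empty input (outside Pre_)

-- ===== PRECONDITION & SPEC =====
-- Pre_ excludes only the empty list, on which A raises ValueError (max of empty sequence).
def Pre_solution (array : List Int) : Prop := array ≠ []
instance (array : List Int) : Decidable (Pre_solution array) := by unfold Pre_solution; infer_instance
def pvWitness_solution : List Int := ([1, 2, 2])

def Spec_solution (array : List Int) (out : Int) : Prop := out = solution_alt array
instance (array : List Int) (out : Int) : Decidable (Spec_solution array out) := by unfold Spec_solution; infer_instance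

-- ===== CLAIM (what is proved, stated in full; the proofs are below) =====
def Claim_equal_solution : Prop := ∀ (array : List Int), Dom_solution array → Pre_solution array → Spec_solution array (solution array)

-- ===== LEMMAS AND PROOFS =====

theorem pvLastOr (k : Int) (l : List Int) (r : Option Int) :
    ((k :: l).getLast?).or r = (l.getLast?).or (some k) := by
  cases l with
  | nil => simp
  | cons a t =>
    rw [List.getLast?_cons_cons]
    obtain ⟨x, hx⟩ := Option.isSome_iff_exists.mp (List.getLast?_isSome.mpr (by simp : (a :: t) ≠ []))
    simp [hx]

theorem pvAfold (K : List Int) (p : Int → Bool) (n : Int) (r : Option Int) :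
    K.foldl (fun (s : Int × Option Int) k => if p k then (s.1 + 1, some k) else s) (n, r)
    = (n + (K.countP p : Int), ((K.filter p).getLast?).or r) := by
  induction K generalizing n r with
  | nil => simp
  | cons k K ih =>
    simp only [List.foldl_cons, List.countP_cons, List.filter_cons]
    by_cases hp : p k
    · simp only [hp, if_pos, ih]
      refine Prod.ext ?_ ?_
      · push_cast; ring
      · exact (pvLastOr k (K.filter p) r).symm
    · simp [hp, ih]

theorem pvMxBound (K : List Int) (c : Int → Int) :
    (0 ≤ K.foldl (fun b j => max b (c j)) 0) ∧ ∀ j ∈ K, c j ≤ K.foldl (fun b j => max b (c j)) 0 :=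
  PySem.List.le_foldl_max_int K c 0

theorem pvMxAttained (K : List Int) (c : Int → Int) (hpos : ∀ k ∈ K, 0 < c k) (hne : K ≠ []) :
    ∃ j ∈ K, c j = K.foldl (fun b j => max b (c j)) 0 := by
  have hmap : K.foldl (fun b j => max b (c j)) 0 = (K.map c).foldl max 0 := by rw [List.foldl_map]
  rcases PySem.List.foldl_max_mem (K.map c) 0 with h0 | hmem
  · exfalso
    obtain ⟨k0, hk0⟩ := List.exists_mem_of_ne_nil K hne
    have := (pvMxBound K c).2 k0 hk0
    have := hpos k0 hk0
    omega
  · obtain ⟨j, hj, hcj⟩ := List.mem_map.mp hmem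
    exact ⟨j, hj, by rw [hmap, hcj]⟩

theorem pvBfold (K : List Int) (c : Int → Int) (hpos : ∀ k ∈ K, 0 < c k) :
    K.foldl (fun (s : Option Int × Int × Bool) k =>
        if c k > s.2.1 then (some k, c k, false)
        else if c k == s.2.1 then (s.1, s.2.1, true)
        else s) (none, 0, false)
    = (K.find? (fun k => c k == K.foldl (fun b j => max b (c j)) 0),
       K.foldl (fun b j => max b (c j)) 0,
       decide (2 ≤ K.countP (fun k => c k == K.foldl (fun b j => max b (c j)) 0))) := by
  induction K using List.reverseRecOn with
  | nil => simp
  | append_singleton K k ih =>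
    have hposK : ∀ j ∈ K, 0 < c j := fun j hj => hpos j (List.mem_append_left _ hj)
    have hposk : 0 < c k := hpos k (by simp)
    set M := K.foldl (fun b j => max b (c j)) 0 with hM
    have hM' : (K ++ [k]).foldl (fun b j => max b (c j)) 0 = max M (c k) := by
      rw [List.foldl_append]; rfl
    have hbound := (pvMxBound K c).2
    rw [List.foldl_append, ih hposK, hM']
    by_cases hgt : c k > M
    · have hmax : max M (c k) = c k := by omega
      rw [hmax]
      have hnone : ∀ j ∈ K, (c j == c k) = false := by
        intro j hj
        have := hbound j hj
        simp only [beq_eq_false_iff_ne, ne_eq]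
        omega
      have hf : K.find? (fun j => c j == c k) = none := List.find?_eq_none.mpr (by
        intro j hj; simp [hnone j hj])
      have hc : K.countP (fun j => c j == c k) = 0 := List.countP_eq_zero.mpr (by
        intro j hj; simp [hnone j hj])
      simp only [List.foldl_cons, List.foldl_nil, if_pos hgt]
      rw [List.find?_append, List.countP_append, hf, hc]
      simp
    · by_cases heq : c k = M
      · have hKne : K ≠ [] := by
          rintro rfl
          simp only [List.foldl_nil] at hM
          omega
        obtain ⟨j0, hj0, hcj0⟩ := pvMxAttained K c hposK hKne
        have hmax : max M (c k) = M := by omega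
        have hfind : K.find? (fun j => c j == M) ≠ none := by
          intro h
          exact absurd (beq_iff_eq.mpr hcj0) (by simpa using List.find?_eq_none.mp h j0 hj0)
        obtain ⟨x, hx⟩ := Option.ne_none_iff_exists'.mp hfind
        have hcnt : 1 ≤ K.countP (fun j => c j == M) :=
          List.countP_pos_iff.mpr ⟨j0, hj0, beq_iff_eq.mpr hcj0⟩
        simp only [List.foldl_cons, List.foldl_nil, if_neg hgt, if_pos (beq_iff_eq.mpr heq)]
        rw [List.find?_append, List.countP_append, hmax, hx]
        simp [heq, hcnt]
      · have hmax : max M (c k) = M := by omega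
        simp only [List.foldl_cons, List.foldl_nil, if_neg hgt,
          if_neg (by simp only [beq_iff_eq]; omega : ¬(c k == M) = true)]
        rw [List.find?_append, List.countP_append, hmax]
        have h1 : [k].find? (fun j => c j == M) = none := by simp; omega
        have h2 : [k].countP (fun j => c j == M) = 0 := by simp; omega
        simp [h1, h2]

theorem pvMain (array : List Int) (hne : array ≠ []) :
    (let countDict := PySem.Dict.counter array
     match PySem.List.max? countDict.values (fun v => v) with
     | none => (0 : Int)
     | some maxNum =>
       let st := countDict.keys.foldl
         (fun (s : Int × Option Int) key =>
           if countDict.getD key 0 == maxNum then (s.1 + 1, some key) else s)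
         (0, none)
       if st.1 == 1 then st.2.getD (-1) else -1)
    = (let st := (PySem.Dict.counter array).items.foldl
        (fun (s : Option Int × Int × Bool) kv =>
          if kv.2 > s.2.1 then (some kv.1, kv.2, false)
          else if kv.2 == s.2.1 then (s.1, s.2.1, true)
          else s)
        (none, 0, false)
       if st.2.2 then -1 else st.1.getD 0) := by
  simp only [PySem.Dict.items_counter, PySem.Dict.getD_counter,
    PySem.Dict.values, PySem.Dict.keys, List.map_map, List.foldl_map, Function.comp_def]
  set K := PySem.Set.ofList array with hK
  have hpos : ∀ k ∈ K, 0 < ((array.count k : Int)) := by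
    intro k hk
    have hmem : k ∈ array := (PySem.Set.mem_ofList array k).mp (hK ▸ hk)
    exact_mod_cast List.count_pos_iff.mpr hmem
  have hKne : K ≠ [] := by
    obtain ⟨a, t, rfl⟩ := List.exists_cons_of_ne_nil hne
    intro h
    have : a ∈ K := (PySem.Set.mem_ofList (a :: t) a).mpr (by simp)
    simp [h] at this
  have hmaxv : PySem.List.max? (K.map (fun k => ((array.count k : Int)))) (fun v => v)
      = some (K.foldl (fun b j => max b ((array.count j : Int))) 0) := by
    obtain ⟨k0, K', hK0⟩ := List.exists_cons_of_ne_nil hKne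
    rw [hK0, List.map_cons, PySem.List.max?_id_cons]
    congr 1
    rw [List.foldl_cons, List.foldl_map]
    have : max 0 ((array.count k0 : Int)) = (array.count k0 : Int) := by
      have := hpos k0 (by rw [hK0]; simp)
      omega
    rw [this]
  rw [hmaxv]
  rw [pvBfold K (fun k => ((array.count k : Int))) hpos]
  rw [show (match some (K.foldl (fun b j => max b ((array.count j : Int))) 0) with
    | none => (0 : Int)
    | some maxNum =>
      let st := K.foldl
        (fun (s : Int × Option Int) key =>
          if ((array.count key : Int)) == maxNum then (s.1 + 1, some key) else s)
        (0, none)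
      if st.1 == 1 then st.2.getD (-1) else -1)
    = (let st := K.foldl
        (fun (s : Int × Option Int) key =>
          if ((array.count key : Int)) == (K.foldl (fun b j => max b ((array.count j : Int))) 0) then (s.1 + 1, some key) else s)
        (0, none)
      if st.1 == 1 then st.2.getD (-1) else -1) from rfl]
  rw [pvAfold K (fun key => ((array.count key : Int)) == (K.foldl (fun b j => max b ((array.count j : Int))) 0)) 0 none]
  set M := K.foldl (fun b j => max b ((array.count j : Int))) 0 with hM
  dsimp only
  obtain ⟨j0, hj0, hcj0⟩ := pvMxAttained K (fun k => ((array.count k : Int))) hpos hKne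
  have hcnt : 1 ≤ K.countP (fun k => ((array.count k : Int)) == M) :=
    List.countP_pos_iff.mpr ⟨j0, hj0, beq_iff_eq.mpr hcj0⟩
  by_cases h2 : 2 ≤ K.countP (fun k => ((array.count k : Int)) == M)
  · have hdec : decide (2 ≤ K.countP (fun k => ((array.count k : Int)) == M)) = true :=
      decide_eq_true h2
    have hcond : ((0 + ((K.countP (fun k => ((array.count k : Int)) == M) : Nat) : Int)) == 1) = false := by
      simp only [beq_eq_false_iff_ne, ne_eq]
      omega
    rw [hcond, hdec]
    simp
  · have h1 : K.countP (fun k => ((array.count k : Int)) == M) = 1 := by omega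
    have hdec : decide (2 ≤ K.countP (fun k => ((array.count k : Int)) == M)) = false := by
      rw [h1]
      decide
    have hcond : ((0 + ((K.countP (fun k => ((array.count k : Int)) == M) : Nat) : Int)) == 1) = true := by
      rw [h1]
      decide
    obtain ⟨u, hu⟩ := List.length_eq_one_iff.mp (by rw [← List.countP_eq_length_filter, h1])
    have hfind : K.find? (fun k => ((array.count k : Int)) == M) = some u := by
      rw [← List.head?_filter, hu]
      rfl
    rw [hcond, hdec, hu, hfind]
    simp

-- ===== VERDICT (by name: the statement is the Claim_ definition above) =====
theorem solution_spec : Claim_equal_solution := by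
  intro array _ hpre
  unfold Spec_solution solution solution_alt
  exact pvMain array hpre
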